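-- pv_equiv track=rewrite | github.com/scieloorg/PC-Programs | src/scielo/bin/xml/modules/xpmaker.py | remove_styles_off_tagged_content
-- ===== SOURCE A (Python) =====
-- def remove_styles_off_tagged_content(tag, content):
--     open_tag = '<' + tag + '>'
--     close_tag = '</' + tag + '>'
--     content = content.replace(open_tag + ' ', ' ' + open_tag).replace(' ' + close_tag, close_tag + ' ')
--     content = content.replace(open_tag, '~BREAK~' + open_tag).replace(close_tag, close_tag + '~BREAK~')
--     parts = []
--     for part in content.split('~BREAK~'):
--         if part.startswith(open_tag) and part.endswith(close_tag):
--             data = part[len(open_tag):]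
--             data = data[0:-len(close_tag)]
--             data = ' '.join([w.strip() for w in data.split()])
--             part = open_tag + data + close_tag
--             remove_all = False
--             if tag == 'source' and len(parts) > 0:
--                 remove_all = 'publication-type="journal"' in parts[len(parts)-1]
--             for style in ['italic', 'bold', 'italic']:
--                 if remove_all or part.startswith(open_tag + '<' + style + '>') and part.endswith('</' + style + '>' + close_tag):
--                     part = part.replace('<' + style + '>', '').replace('</' + style + '>', '')
--         parts.append(part)
--     return ''.join(parts).replace(open_tag + ' ', ' ' + open_tag).replace(' ' + close_tag, close_tag + ' ')
-- ===== SOURCE B (Python) =====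
-- # Single fused character-level scan: no '~BREAK~' marker insertion, no split pass --
-- # segments are cut directly at open-tag starts and close-tag ends while streaming the
-- # transformed output, carrying the previously emitted segment for the look-back.
--
-- def _emit(tag, open_tag, close_tag, prev, seg):
--     if not (seg.startswith(open_tag) and seg.endswith(close_tag)):
--         return seg
--     data = ' '.join(seg[len(open_tag):-len(close_tag)].split())
--     seg = open_tag + data + close_tag
--     remove_all = tag == 'source' and prev is not None and 'publication-type="journal"' in prev
--     for style in ('italic', 'bold', 'italic'):
--         if remove_all or (seg.startswith(open_tag + '<' + style + '>') and seg.endswith('</' + style + '>' + close_tag)):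
--             seg = seg.replace('<' + style + '>', '').replace('</' + style + '>', '')
--     return seg
--
-- def remove_styles_off_tagged_content(tag, content):
--     open_tag = '<' + tag + '>'
--     close_tag = '</' + tag + '>'
--     content = content.replace(open_tag + ' ', ' ' + open_tag).replace(' ' + close_tag, close_tag + ' ')
--     res = []       # emitted segments, joined at the end
--     prev = None    # previously emitted segment
--     cur = []       # characters of the segment under construction
--     i = 0
--     n = len(content)
--     while i < n:
--         if content.startswith(open_tag, i):
--             seg = _emit(tag, open_tag, close_tag, prev, ''.join(cur))
--             res.append(seg)
--             prev = seg
--             cur = list(open_tag)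
--             i += len(open_tag)
--         elif content.startswith(close_tag, i):
--             seg = _emit(tag, open_tag, close_tag, prev, ''.join(cur) + close_tag)
--             res.append(seg)
--             prev = seg
--             cur = []
--             i += len(close_tag)
--         else:
--             cur.append(content[i])
--             i += 1
--     res.append(_emit(tag, open_tag, close_tag, prev, ''.join(cur)))
--     return ''.join(res).replace(open_tag + ' ', ' ' + open_tag).replace(' ' + close_tag, close_tag + ' ')
-- ===== Notes on version B (the rewrite author's own statement) =====
-- stated objective: alternative
-- what changed: B drops A's '~BREAK~' marker-insert-then-split mechanism entirely: a single fused character-level scan cuts segments directly at open-tag starts and close-tag ends, transforming each tagged segment inline while streaming the output and carrying the previously emitted segment (no marker string, no split pass, no back-indexing into a parts list).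
-- outside the precondition, e.g. on remove_styles_off_tagged_content('t', 'x~BREAK~y'): A returns 'xy', B returns 'x~BREAK~y'; on remove_styles_off_tagged_content('~BREAK~', '<~BREAK~>x</~BREAK~>'): A returns '<>x</>', B returns '<~BREAK~>x</~BREAK~>'
import Mathlib
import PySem

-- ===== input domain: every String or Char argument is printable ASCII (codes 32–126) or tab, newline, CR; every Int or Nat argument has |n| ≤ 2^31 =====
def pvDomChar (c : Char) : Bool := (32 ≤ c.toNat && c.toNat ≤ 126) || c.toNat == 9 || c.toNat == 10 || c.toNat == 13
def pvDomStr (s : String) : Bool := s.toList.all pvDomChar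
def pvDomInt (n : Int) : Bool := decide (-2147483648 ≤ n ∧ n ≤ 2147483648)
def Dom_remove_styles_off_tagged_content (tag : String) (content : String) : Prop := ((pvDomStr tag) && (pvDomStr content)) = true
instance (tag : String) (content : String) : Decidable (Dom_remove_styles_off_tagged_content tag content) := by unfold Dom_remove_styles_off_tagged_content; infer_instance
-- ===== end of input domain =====

-- B replaces A's '~BREAK~' marker-insert-then-split mechanism by a single fused character-level
-- scan that cuts segments directly at open-tag starts and close-tag ends, transforming tagged
-- segments inline while streaming the output; objective: alternative algorithm (same O(n) cost,
-- no speed claim).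

-- ===== PORT A =====
def remove_styles_off_tagged_content (tag : String) (content : String) : String :=
  let open_tag : String := "<" ++ tag ++ ">"
  let close_tag : String := "</" ++ tag ++ ">"
  let content1 := PySem.Str.replace (PySem.Str.replace content (open_tag ++ " ") (" " ++ open_tag)) (" " ++ close_tag) (close_tag ++ " ")
  let content2 := PySem.Str.replace (PySem.Str.replace content1 open_tag ("~BREAK~" ++ open_tag)) close_tag (close_tag ++ "~BREAK~")
  let parts := ((PySem.Str.split? content2 "~BREAK~").getD []).foldl (fun (parts : List String) (part : String) =>
    let part :=
      if PySem.Str.startswith part open_tag && PySem.Str.endswith part close_tag then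
        let data := PySem.Str.slice part (some (PySem.Str.len open_tag)) none
        let data := PySem.Str.slice data (some 0) (some (-(PySem.Str.len close_tag)))
        let data := PySem.Str.join " " ((PySem.Str.split₀ data).map PySem.Str.strip)
        let part := open_tag ++ data ++ close_tag
        let remove_all : Bool :=
          if tag == "source" && decide (0 < parts.length) then
            PySem.Str.isIn "publication-type=\"journal\"" ((PySem.List.pyGet? parts ((parts.length : Int) - 1)).getD "")
          else false
        ["italic", "bold", "italic"].foldl (fun (part : String) (style : String) =>
          if remove_all || (PySem.Str.startswith part (open_tag ++ "<" ++ style ++ ">") && PySem.Str.endswith part ("</" ++ style ++ ">" ++ close_tag)) then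
            PySem.Str.replace (PySem.Str.replace part ("<" ++ style ++ ">") "") ("</" ++ style ++ ">") ""
          else part) part
      else part
    parts ++ [part]) []
  PySem.Str.replace (PySem.Str.replace (PySem.Str.join "" parts) (open_tag ++ " ") (" " ++ open_tag)) (" " ++ close_tag) (close_tag ++ " ")

-- ===== PORT B =====
-- port of Source B's _emit (the per-segment transform)
def pvFixPart (tag open_tag close_tag : String) (prev : Option String) (part : String) : String :=
  if !(PySem.Str.startswith part open_tag && PySem.Str.endswith part close_tag) then part
  else
    let inner := PySem.Str.join " " (PySem.Str.split₀ (PySem.Str.slice part (some (PySem.Str.len open_tag)) (some (-(PySem.Str.len close_tag)))))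
    let part := open_tag ++ inner ++ close_tag
    let remove_all : Bool := tag == "source" &&
      (match prev with
       | none => false
       | some p => PySem.Str.isIn "publication-type=\"journal\"" p)
    ["italic", "bold", "italic"].foldl (fun (part : String) (style : String) =>
      if remove_all || (PySem.Str.startswith part (open_tag ++ "<" ++ style ++ ">") && PySem.Str.endswith part ("</" ++ style ++ ">" ++ close_tag)) then
        PySem.Str.replace (PySem.Str.replace part ("<" ++ style ++ ">") "") ("</" ++ style ++ ">") ""
      else part) part

-- port of Source B's while loop: `rest` is content[i:], `cur` the segment under construction
-- (Source B keeps it as a char list joined on emission; here the accumulated String holds the same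
-- characters), `prev` the previously emitted segment, `res` the output built so far (Source B joins
-- its emitted-segment list at the end; here the segments are concatenated as they are emitted).
-- `fuel` is a totality device only: the loop consumes ≥ 1 character per step and is called with
-- fuel = length.
def pvScanGo (tag open_tag close_tag : String) : Nat → List Char → String → Option String → String → String
  | _, [], cur, prev, res => res ++ pvFixPart tag open_tag close_tag prev cur
  | 0, _ :: _, cur, prev, res => res ++ pvFixPart tag open_tag close_tag prev cur
  | fuel + 1, c :: t, cur, prev, res =>
    if open_tag.toList.isPrefixOf (c :: t) then
      let seg := pvFixPart tag open_tag close_tag prev cur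
      pvScanGo tag open_tag close_tag fuel ((c :: t).drop open_tag.toList.length) open_tag (some seg) (res ++ seg)
    else if close_tag.toList.isPrefixOf (c :: t) then
      let seg := pvFixPart tag open_tag close_tag prev (cur ++ close_tag)
      pvScanGo tag open_tag close_tag fuel ((c :: t).drop close_tag.toList.length) "" (some seg) (res ++ seg)
    else
      pvScanGo tag open_tag close_tag fuel t (cur.push c) prev res

def remove_styles_off_tagged_content_alt (tag : String) (content : String) : String :=
  let open_tag : String := "<" ++ tag ++ ">"
  let close_tag : String := "</" ++ tag ++ ">"
  let content1 := PySem.Str.replace (PySem.Str.replace content (open_tag ++ " ") (" " ++ open_tag)) (" " ++ close_tag) (close_tag ++ " ")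
  let res := pvScanGo tag open_tag close_tag content1.toList.length content1.toList "" none ""
  PySem.Str.replace (PySem.Str.replace res (open_tag ++ " ") (" " ++ open_tag)) (" " ++ close_tag) (close_tag ++ " ")

-- ===== PRECONDITION & SPEC =====
-- Pre_ excludes inputs on which A's '~BREAK~' sentinel mechanism can produce accidental values
-- although A returns: content already containing the marker fragment '~BREAK' (A's split eats or
-- shifts at pre-existing markers) and tags containing '<' or '~' (tag tokens can then overlap
-- each other or the inserted markers, shifting A's cut points); the conditions are conservative —
-- on many excluded inputs the two implementations still happen to agree.
def Pre_remove_styles_off_tagged_content (tag : String) (content : String) : Prop :=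
  '<' ∉ tag.toList ∧ '~' ∉ tag.toList ∧ ¬ ("~BREAK".toList <:+: content.toList)
instance (tag : String) (content : String) : Decidable (Pre_remove_styles_off_tagged_content tag content) := by
  unfold Pre_remove_styles_off_tagged_content; infer_instance

def pvWitness_remove_styles_off_tagged_content : String × String :=
  ("b", "<b> x </b>")

def Spec_remove_styles_off_tagged_content (tag : String) (content : String) (out : String) : Prop := out = remove_styles_off_tagged_content_alt tag content
instance (tag : String) (content : String) (out : String) : Decidable (Spec_remove_styles_off_tagged_content tag content out) := by unfold Spec_remove_styles_off_tagged_content; infer_instance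

-- ===== CLAIM (what is proved, stated in full; the proofs are below) =====
def Claim_equal_remove_styles_off_tagged_content : Prop := ∀ (tag : String) (content : String), Dom_remove_styles_off_tagged_content tag content → Pre_remove_styles_off_tagged_content tag content → Spec_remove_styles_off_tagged_content tag content (remove_styles_off_tagged_content tag content)

-- ===== LEMMAS AND PROOFS =====

-- clean (fuel-free) forms of PySem's replace / splitOn scanners, and the direct segmentation

def pvM : List Char := ['~', 'B', 'R', 'E', 'A', 'K', '~']
def pvMB : List Char := ['~', 'B', 'R', 'E', 'A', 'K']
def pvOt (tagL : List Char) : List Char := '<' :: (tagL ++ ['>'])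
def pvCt (tagL : List Char) : List Char := '<' :: '/' :: (tagL ++ ['>'])

def pvRepl (old new : List Char) : List Char → List Char
  | [] => []
  | c :: t =>
    if h : old ≠ [] ∧ old.isPrefixOf (c :: t) then new ++ pvRepl old new ((c :: t).drop old.length)
    else c :: pvRepl old new t
termination_by l => l.length
decreasing_by
  · simp only [List.length_drop, List.length_cons]
    have : 1 ≤ old.length := List.length_pos_iff.mpr h.1
    omega
  · simp

def pvSplt (sep : List Char) : List Char → List (List Char)
  | [] => [[]]
  | c :: t =>
    if h : sep ≠ [] ∧ sep.isPrefixOf (c :: t) then [] :: pvSplt sep ((c :: t).drop sep.length)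
    else (pvSplt sep t).modifyHead (c :: ·)
termination_by l => l.length
decreasing_by
  · simp only [List.length_drop, List.length_cons]
    have : 1 ≤ sep.length := List.length_pos_iff.mpr h.1
    omega
  · simp

def pvMark (tagL : List Char) : List Char → List Char
  | [] => []
  | c :: t =>
    if (pvOt tagL).isPrefixOf (c :: t) then
      pvM ++ pvOt tagL ++ pvMark tagL ((c :: t).drop (pvOt tagL).length)
    else if (pvCt tagL).isPrefixOf (c :: t) then
      pvCt tagL ++ pvM ++ pvMark tagL ((c :: t).drop (pvCt tagL).length)
    else c :: pvMark tagL t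
termination_by l => l.length
decreasing_by
  · simp only [List.length_drop, List.length_cons, pvOt, List.length_append]
    omega
  · simp only [List.length_drop, List.length_cons, pvCt, List.length_append]
    omega
  · simp

def pvSegs (tagL : List Char) : List Char → List (List Char)
  | [] => [[]]
  | c :: t =>
    if (pvOt tagL).isPrefixOf (c :: t) then
      [] :: (pvSegs tagL ((c :: t).drop (pvOt tagL).length)).modifyHead (pvOt tagL ++ ·)
    else if (pvCt tagL).isPrefixOf (c :: t) then
      pvCt tagL :: pvSegs tagL ((c :: t).drop (pvCt tagL).length)
    else (pvSegs tagL t).modifyHead (c :: ·)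
termination_by l => l.length
decreasing_by
  · simp only [List.length_drop, List.length_cons, pvOt, List.length_append]
    omega
  · simp only [List.length_drop, List.length_cons, pvCt, List.length_append]
    omega
  · simp

-- fuel bridges
lemma pv_replace_go_eq (old new : List Char) (hold : old ≠ []) :
    ∀ fuel l acc, l.length ≤ fuel →
      PySem.Chars.replace.go old new fuel l acc = acc.reverse ++ pvRepl old new l := by
  intro fuel
  induction fuel with
  | zero =>
    intro l acc h
    have hl : l = [] := by cases l with | nil => rfl | cons c t => simp at h
    subst hl
    simp [PySem.Chars.replace.go, pvRepl]
  | succ fuel ih =>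
    intro l acc h
    cases l with
    | nil => simp [PySem.Chars.replace.go, pvRepl]
    | cons c t =>
      by_cases hp : old.isPrefixOf (c :: t)
      · rw [show PySem.Chars.replace.go old new (fuel + 1) (c :: t) acc =
            PySem.Chars.replace.go old new fuel ((c :: t).drop old.length) (new.reverse ++ acc) from by
          conv_lhs => rw [PySem.Chars.replace.go]
          simp [hp]]
        rw [ih _ _ (by
          simp only [List.length_drop, List.length_cons]
          have : 1 ≤ old.length := List.length_pos_iff.mpr hold
          simp only [List.length_cons] at h
          omega)]
        rw [show pvRepl old new (c :: t) = new ++ pvRepl old new ((c :: t).drop old.length) from by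
          rw [pvRepl]; rw [dif_pos ⟨hold, hp⟩]]
        simp
      · rw [show PySem.Chars.replace.go old new (fuel + 1) (c :: t) acc =
            PySem.Chars.replace.go old new fuel t (c :: acc) from by
          conv_lhs => rw [PySem.Chars.replace.go]
          simp [hp]]
        rw [ih _ _ (by simp only [List.length_cons] at h; omega)]
        rw [show pvRepl old new (c :: t) = c :: pvRepl old new t from by
          rw [pvRepl]; rw [dif_neg (by simp [hp])]]
        simp

lemma pv_replace_eq (s old new : List Char) (hold : old ≠ []) :
    PySem.Chars.replace s old new = pvRepl old new s := by
  unfold PySem.Chars.replace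
  rw [if_neg (by simpa using hold)]
  simpa using pv_replace_go_eq old new hold s.length s [] le_rfl

lemma pv_splitOn_go_eq (sep : List Char) (hsep : sep ≠ []) :
    ∀ fuel l cur acc, l.length ≤ fuel →
      PySem.Chars.splitOn.go sep fuel l cur acc =
        acc.reverse ++ (pvSplt sep l).modifyHead (cur.reverse ++ ·) := by
  intro fuel
  induction fuel with
  | zero =>
    intro l cur acc h
    have hl : l = [] := by cases l with | nil => rfl | cons c t => simp at h
    subst hl
    simp [PySem.Chars.splitOn.go, pvSplt]
  | succ fuel ih =>
    intro l cur acc h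
    cases l with
    | nil => simp [PySem.Chars.splitOn.go, pvSplt]
    | cons c t =>
      by_cases hp : sep.isPrefixOf (c :: t)
      · rw [show PySem.Chars.splitOn.go sep (fuel + 1) (c :: t) cur acc =
            PySem.Chars.splitOn.go sep fuel ((c :: t).drop sep.length) [] (cur.reverse :: acc) from by
          conv_lhs => rw [PySem.Chars.splitOn.go]
          simp [hp]]
        rw [ih _ _ _ (by
          simp only [List.length_drop, List.length_cons]
          have : 1 ≤ sep.length := List.length_pos_iff.mpr hsep
          simp only [List.length_cons] at h
          omega)]
        rw [show pvSplt sep (c :: t) = [] :: pvSplt sep ((c :: t).drop sep.length) from by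
          rw [pvSplt]; rw [dif_pos ⟨hsep, hp⟩]]
        cases pvSplt sep ((c :: t).drop sep.length) <;> simp
      · rw [show PySem.Chars.splitOn.go sep (fuel + 1) (c :: t) cur acc =
            PySem.Chars.splitOn.go sep fuel t (c :: cur) acc from by
          conv_lhs => rw [PySem.Chars.splitOn.go]
          simp [hp]]
        rw [ih _ _ _ (by simp only [List.length_cons] at h; omega)]
        rw [show pvSplt sep (c :: t) = (pvSplt sep t).modifyHead (c :: ·) from by
          rw [pvSplt]; rw [dif_neg (by simp [hp])]]
        cases pvSplt sep t <;> simp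

lemma pv_splitOn_eq (s sep : List Char) (hsep : sep ≠ []) :
    PySem.Chars.splitOn s sep = pvSplt sep s := by
  unfold PySem.Chars.splitOn
  rw [pv_splitOn_go_eq sep hsep (s.length + 1) s [] [] (by omega)]
  cases pvSplt sep s <;> simp

-- prefix toolbox
lemma pv_prefix_of_prefix_append {a b y : List Char} (h : a <+: b ++ y) (hl : b.length ≤ a.length) :
    b <+: a := by
  obtain ⟨r, hr⟩ := h
  have hb : b = a.take b.length := by
    have := congrArg (List.take b.length) hr
    rw [List.take_append_of_le_length hl, List.take_left] at this
    exact this.symm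
  rw [hb]
  exact List.take_prefix _ _

lemma pv_not_ot_prefix_ct (tagL : List Char) : ¬ pvOt tagL <+: pvCt tagL := by
  intro h
  unfold pvOt pvCt at h
  rw [List.cons_prefix_cons] at h
  obtain ⟨-, hu⟩ := h
  set u : List Char := tagL ++ ['>'] with hud
  have key : ∀ i, ∀ hi : i < u.length, u[i] = '/' := by
    intro i
    induction i with
    | zero =>
      intro hi
      have := hu.getElem (i := 0) hi
      simpa using this
    | succ j ihj =>
      intro hi
      have h2 := hu.getElem (i := j + 1) hi
      simp only [List.getElem_cons_succ] at h2
      rw [h2]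
      exact ihj (by omega)
  have hlast : u[tagL.length]'(by simp [hud]) = '>' := by
    simp [hud]
  have := key tagL.length (by simp [hud])
  rw [hlast] at this
  exact absurd this (by decide)

lemma pv_infix_drop_block (p : List Char) (hp : p ≠ []) :
    ∀ (a R : List Char), p.headI ∉ a → p <:+: a ++ R → p <:+: R := by
  intro a
  induction a with
  | nil => intro R _ h; simpa using h
  | cons d a' ih =>
    intro R hd h
    rw [List.cons_append, List.infix_cons_iff] at h
    rcases h with h | h
    · exfalso
      obtain ⟨p0, p', rfl⟩ : ∃ p0 p', p = p0 :: p' := by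
        cases p with | nil => exact absurd rfl hp | cons p0 p' => exact ⟨p0, p', rfl⟩
      rw [List.cons_prefix_cons] at h
      exact hd (by simp [← h.1])
    · exact ih R (fun hm => hd (List.mem_cons_of_mem _ hm)) h

lemma pv_modifyHead_nil (l : List (List Char)) : l.modifyHead (fun x => [] ++ x) = l := by
  cases l <;> simp

lemma pv_modifyHead_comp (l : List (List Char)) (f g : List Char → List Char) :
    (l.modifyHead f).modifyHead g = l.modifyHead (fun x => g (f x)) := by
  cases l <;> simp

-- a prefix of a replace-result that avoids the replacement's head char comes from the source
lemma pv_prefix_repl (old : List Char) (n0 : Char) (ntail : List Char) (hold : old ≠ []) :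
    ∀ (m q : List Char), n0 ∉ q → q <+: pvRepl old (n0 :: ntail) m → q <+: m := by
  intro m
  induction m using pvRepl.induct (old := old) with
  | case1 =>
    intro q hq h
    rw [pvRepl] at h
    simpa using h
  | case2 c t h ih =>
    intro q hq hpre
    rw [pvRepl, dif_pos h] at hpre
    cases q with
    | nil => exact List.nil_prefix
    | cons d q' =>
      exfalso
      rw [show (n0 :: ntail) ++ pvRepl old (n0 :: ntail) ((c :: t).drop old.length) =
          n0 :: (ntail ++ pvRepl old (n0 :: ntail) ((c :: t).drop old.length)) from rfl,
        List.cons_prefix_cons] at hpre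
      exact hq (hpre.1 ▸ List.mem_cons_self)
  | case3 c t h ih =>
    intro q hq hpre
    rw [pvRepl, dif_neg h] at hpre
    cases q with
    | nil => exact List.nil_prefix
    | cons d q' =>
      rw [List.cons_prefix_cons] at hpre
      obtain ⟨rfl, h2⟩ := hpre
      exact List.cons_prefix_cons.mpr ⟨rfl, ih q' (fun hm => hq (List.mem_cons_of_mem _ hm)) h2⟩

-- replace passes over a block that avoids the pattern's head char
lemma pv_repl_skip (old new : List Char) (hold : old ≠ []) :
    ∀ (a y : List Char), (∀ c ∈ a, c ≠ old.headI) →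
      pvRepl old new (a ++ y) = a ++ pvRepl old new y := by
  intro a
  induction a with
  | nil => simp
  | cons d a' ih =>
    intro y hy
    have hnp : ¬ old.isPrefixOf (d :: (a' ++ y)) := by
      intro hp
      obtain ⟨o0, ot, rfl⟩ : ∃ o0 ot, old = o0 :: ot := by
        cases old with | nil => exact absurd rfl hold | cons o0 ot => exact ⟨o0, ot, rfl⟩
      rw [List.isPrefixOf_iff_prefix, List.cons_prefix_cons] at hp
      exact hy d List.mem_cons_self (by simp [hp.1])
    rw [show (d :: a') ++ y = d :: (a' ++ y) from rfl, pvRepl, dif_neg (by simp [hnp])]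
    rw [ih y (fun c hc => hy c (List.mem_cons_of_mem _ hc))]
    simp

-- split passes over a block without '~'
lemma pv_splt_skip : ∀ (a y : List Char), '~' ∉ a →
    pvSplt pvM (a ++ y) = (pvSplt pvM y).modifyHead (a ++ ·) := by
  intro a
  induction a with
  | nil => intro y _; exact (pv_modifyHead_nil _).symm
  | cons d a' ih =>
    intro y hy
    have hnp : ¬ pvM.isPrefixOf (d :: (a' ++ y)) := by
      intro hp
      rw [show pvM = '~' :: ['B', 'R', 'E', 'A', 'K', '~'] from rfl,
        List.isPrefixOf_iff_prefix, List.cons_prefix_cons] at hp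
      exact hy (by simp [← hp.1])
    rw [show (d :: a') ++ y = d :: (a' ++ y) from rfl, pvSplt, dif_neg (by simp [hnp])]
    rw [ih y (fun hc => hy (List.mem_cons_of_mem _ hc))]
    rw [pv_modifyHead_comp]
    rfl


lemma pv_splt_sep (x : List Char) : pvSplt pvM (pvM ++ x) = [] :: pvSplt pvM x := by
  rw [show pvM ++ x = '~' :: (['B', 'R', 'E', 'A', 'K', '~'] ++ x) from rfl, pvSplt,
    dif_pos ⟨by decide, by rw [List.isPrefixOf_iff_prefix]; exact ⟨x, rfl⟩⟩]
  congr 1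

-- ===== phase 1: the whitespace pass cannot create '~BREAK' =====
lemma pv_infix_of_infix_repl (old : List Char) (n0 : Char) (ntail : List Char) (hold : old ≠ [])
    (h0 : n0 ∉ pvMB) (h1 : '~' ∉ n0 :: ntail) :
    ∀ m, pvMB <:+: pvRepl old (n0 :: ntail) m → pvMB <:+: m := by
  intro m
  induction m using pvRepl.induct (old := old) with
  | case1 =>
    intro h
    rw [pvRepl] at h
    simp only [List.infix_nil] at h
    exact absurd h (by decide)
  | case2 c t hcond ih =>
    intro h
    rw [pvRepl, dif_pos hcond] at h
    have h2 : pvMB <:+: pvRepl old (n0 :: ntail) ((c :: t).drop old.length) := by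
      refine pv_infix_drop_block pvMB (by decide) (n0 :: ntail) _ ?_ h
      intro hm
      rw [show pvMB.headI = '~' from rfl] at hm
      exact h1 hm
    exact (ih h2).trans (List.IsSuffix.isInfix (List.drop_suffix _ _))
  | case3 c t hcond ih =>
    intro h
    rw [pvRepl, dif_neg hcond] at h
    rw [List.infix_cons_iff] at h
    rcases h with h | h
    · rw [show pvMB = '~' :: ['B', 'R', 'E', 'A', 'K'] from rfl, List.cons_prefix_cons] at h
      have h4 : ['B', 'R', 'E', 'A', 'K'] <+: t :=
        pv_prefix_repl old n0 ntail hold t _ (fun hm => h0 (List.mem_cons_of_mem _ hm)) h.2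
      exact List.IsPrefix.isInfix (List.cons_prefix_cons.mpr ⟨h.1, h4⟩)
    · exact (ih h).trans (List.IsSuffix.isInfix (List.suffix_cons c t))

-- ===== phase 2: the two marker replaces equal the fused marker scan =====
lemma pv_replace2_eq_mark (tagL : List Char) (h1 : '<' ∉ tagL) (h2 : '~' ∉ tagL) :
    ∀ l, pvRepl (pvCt tagL) (pvCt tagL ++ pvM) (pvRepl (pvOt tagL) (pvM ++ pvOt tagL) l) =
      pvMark tagL l := by
  have fo : pvOt tagL ≠ [] := by simp [pvOt]
  have fc : pvCt tagL ≠ [] := by simp [pvCt]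
  have notpc := pv_not_ot_prefix_ct tagL
  have noc : ∀ y, ¬ pvCt tagL <+: (pvOt tagL ++ y) := fun y h =>
    notpc (pv_prefix_of_prefix_append h (by simp [pvOt, pvCt]))
  have hskipM : ∀ x ∈ pvM, x ≠ (pvCt tagL).headI := by
    intro x hx
    rw [show (pvCt tagL).headI = '<' from rfl]
    fin_cases hx <;> decide
  have hskipT : ∀ x ∈ tagL ++ ['>'], x ≠ (pvCt tagL).headI := by
    intro x hx
    rw [show (pvCt tagL).headI = '<' from rfl]
    rcases List.mem_append.mp hx with h | h
    · exact fun he => h1 (he ▸ h)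
    · simp only [List.mem_singleton] at h; subst h; decide
  have hskipT' : ∀ x ∈ '/' :: (tagL ++ ['>']), x ≠ (pvOt tagL).headI := by
    intro x hx
    rw [show (pvOt tagL).headI = '<' from rfl]
    rcases List.mem_cons.mp hx with h | h
    · subst h; decide
    · rcases List.mem_append.mp h with h | h
      · exact fun he => h1 (he ▸ h)
      · simp only [List.mem_singleton] at h; subst h; decide
  intro l
  induction l using pvMark.induct (tagL := tagL) with
  | case1 => simp [pvRepl, pvMark]
  | case2 c t hp ih =>
    conv_rhs => rw [pvMark, if_pos hp]
    rw [show pvRepl (pvOt tagL) (pvM ++ pvOt tagL) (c :: t) =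
        (pvM ++ pvOt tagL) ++ pvRepl (pvOt tagL) (pvM ++ pvOt tagL) ((c :: t).drop (pvOt tagL).length) from by
      rw [pvRepl, dif_pos ⟨fo, hp⟩]]
    set X := pvRepl (pvOt tagL) (pvM ++ pvOt tagL) ((c :: t).drop (pvOt tagL).length) with hX
    rw [List.append_assoc, pv_repl_skip _ _ fc pvM _ hskipM]
    rw [show pvOt tagL ++ X = '<' :: ((tagL ++ ['>']) ++ X) from rfl]
    rw [show pvRepl (pvCt tagL) (pvCt tagL ++ pvM) ('<' :: ((tagL ++ ['>']) ++ X)) =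
        '<' :: pvRepl (pvCt tagL) (pvCt tagL ++ pvM) ((tagL ++ ['>']) ++ X) from by
      rw [pvRepl, dif_neg]
      rintro ⟨-, hpre⟩
      exact noc X (by rw [← List.isPrefixOf_iff_prefix]; exact hpre)]
    rw [pv_repl_skip _ _ fc _ _ hskipT, ih]
    simp [pvOt]
  | case3 c t hno hp ih =>
    have hy := List.isPrefixOf_iff_prefix.mp hp
    obtain ⟨y, hy⟩ := hy
    have hdrop : (c :: t).drop (pvCt tagL).length = y := by
      rw [← hy, List.drop_left]
    simp only [pvCt, List.cons_append] at hy
    injection hy with hyc hyt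
    subst hyc
    subst hyt
    conv_rhs => rw [pvMark, if_neg hno, if_pos hp, hdrop]
    rw [show pvRepl (pvOt tagL) (pvM ++ pvOt tagL) ('<' :: ('/' :: (tagL ++ ['>'] ++ y))) =
        '<' :: pvRepl (pvOt tagL) (pvM ++ pvOt tagL) ('/' :: (tagL ++ ['>'] ++ y)) from by
      rw [pvRepl, dif_neg]
      rintro ⟨-, hpre⟩
      exact hno hpre]
    rw [show '/' :: (tagL ++ ['>'] ++ y) = ('/' :: (tagL ++ ['>'])) ++ y from by simp]
    rw [pv_repl_skip _ _ fo _ _ hskipT']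
    rw [show ('<' : Char) :: (('/' :: (tagL ++ ['>'])) ++ pvRepl (pvOt tagL) (pvM ++ pvOt tagL) y) =
        pvCt tagL ++ pvRepl (pvOt tagL) (pvM ++ pvOt tagL) y from by simp [pvCt]]
    set R := pvRepl (pvOt tagL) (pvM ++ pvOt tagL) y with hR
    rw [show pvRepl (pvCt tagL) (pvCt tagL ++ pvM) (pvCt tagL ++ R) =
        (pvCt tagL ++ pvM) ++ pvRepl (pvCt tagL) (pvCt tagL ++ pvM) R from by
      rw [show pvCt tagL ++ R = '<' :: ('/' :: (tagL ++ ['>'] ++ R)) from by simp [pvCt]]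
      rw [pvRepl, dif_pos ⟨fc, by
        rw [List.isPrefixOf_iff_prefix]
        exact ⟨R, by simp [pvCt]⟩⟩,
        show List.drop (pvCt tagL).length ('<' :: ('/' :: (tagL ++ ['>'] ++ R))) = R from by
          rw [show ('<' : Char) :: ('/' :: (tagL ++ ['>'] ++ R)) = pvCt tagL ++ R from by simp [pvCt],
            List.drop_left]]]
    rw [hdrop] at ih
    rw [ih]
  | case4 c t hno hnc ih =>
    conv_rhs => rw [pvMark, if_neg hno, if_neg hnc]
    rw [show pvRepl (pvOt tagL) (pvM ++ pvOt tagL) (c :: t) =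
        c :: pvRepl (pvOt tagL) (pvM ++ pvOt tagL) t from by
      rw [pvRepl, dif_neg]
      rintro ⟨-, hpre⟩
      exact hno hpre]
    rw [show pvRepl (pvCt tagL) (pvCt tagL ++ pvM) (c :: pvRepl (pvOt tagL) (pvM ++ pvOt tagL) t) =
        c :: pvRepl (pvCt tagL) (pvCt tagL ++ pvM) (pvRepl (pvOt tagL) (pvM ++ pvOt tagL) t) from by
      rw [pvRepl, dif_neg]
      rintro ⟨-, hpre⟩
      rw [List.isPrefixOf_iff_prefix] at hpre
      rw [show pvCt tagL = '<' :: ('/' :: (tagL ++ ['>'])) from rfl, List.cons_prefix_cons] at hpre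
      have hv : ('/' :: (tagL ++ ['>'])) <+: t := by
        refine pv_prefix_repl (pvOt tagL) '~' (['B', 'R', 'E', 'A', 'K', '~'] ++ pvOt tagL) fo t _ ?_ ?_
        · intro hm
          rcases List.mem_cons.mp hm with h | h
          · exact absurd h (by decide)
          · rcases List.mem_append.mp h with h | h
            · exact h2 h
            · exact absurd h (by simp)
        · exact hpre.2
      exact hnc (by
        rw [List.isPrefixOf_iff_prefix, show pvCt tagL = '<' :: ('/' :: (tagL ++ ['>'])) from rfl]
        exact List.cons_prefix_cons.mpr ⟨hpre.1, hv⟩)]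
    rw [ih]

-- ===== phase 3: splitting the marked string equals the direct segmentation =====
lemma pv_mark_no_q_tilde (tagL : List Char) :
    ∀ (m q : List Char), (∀ c ∈ q, c ≠ '~' ∧ c ≠ '<') → q ++ ['~'] <+: pvMark tagL m → q <+: m := by
  intro m
  induction m using pvMark.induct (tagL := tagL) with
  | case1 =>
    intro q hq h
    rw [pvMark] at h
    rw [List.prefix_nil] at h
    simp at h
  | case2 c t hp ih =>
    intro q hq h
    rw [pvMark, if_pos hp] at h
    cases q with
    | nil => exact List.nil_prefix
    | cons d q' =>
      exfalso
      rw [show ((d :: q') ++ ['~']) = d :: (q' ++ ['~']) from rfl,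
        show pvM ++ pvOt tagL ++ pvMark tagL ((c :: t).drop (pvOt tagL).length) =
          '~' :: (['B', 'R', 'E', 'A', 'K', '~'] ++ pvOt tagL ++ pvMark tagL ((c :: t).drop (pvOt tagL).length)) from by simp [pvM],
        List.cons_prefix_cons] at h
      exact (hq d List.mem_cons_self).1 h.1
  | case3 c t hno hp ih =>
    intro q hq h
    rw [pvMark, if_neg hno, if_pos hp] at h
    cases q with
    | nil => exact List.nil_prefix
    | cons d q' =>
      exfalso
      rw [show ((d :: q') ++ ['~']) = d :: (q' ++ ['~']) from rfl,
        show pvCt tagL ++ pvM ++ pvMark tagL ((c :: t).drop (pvCt tagL).length) =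
          '<' :: ('/' :: (tagL ++ ['>']) ++ pvM ++ pvMark tagL ((c :: t).drop (pvCt tagL).length)) from by simp [pvCt],
        List.cons_prefix_cons] at h
      exact (hq d List.mem_cons_self).2 h.1
  | case4 c t hno hnc ih =>
    intro q hq h
    rw [pvMark, if_neg hno, if_neg hnc] at h
    cases q with
    | nil => exact List.nil_prefix
    | cons d q' =>
      rw [show ((d :: q') ++ ['~']) = d :: (q' ++ ['~']) from rfl, List.cons_prefix_cons] at h
      exact List.cons_prefix_cons.mpr
        ⟨h.1, ih q' (fun x hx => hq x (List.mem_cons_of_mem _ hx)) h.2⟩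

lemma pv_split_mark (tagL : List Char) (h1 : '<' ∉ tagL) (h2 : '~' ∉ tagL) :
    ∀ l, ¬ pvMB <:+: l → pvSplt pvM (pvMark tagL l) = pvSegs tagL l := by
  have hnotO : '~' ∉ pvOt tagL := by
    simp only [pvOt, List.mem_cons, List.mem_append, List.mem_singleton]
    rintro (h | h | h)
    · exact absurd h (by decide)
    · exact h2 h
    · exact absurd h (by decide)
  have hnotC : '~' ∉ pvCt tagL := by
    simp only [pvCt, List.mem_cons, List.mem_append, List.mem_singleton]
    rintro (h | h | h | h)
    · exact absurd h (by decide)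
    · exact absurd h (by decide)
    · exact h2 h
    · exact absurd h (by decide)
  intro l
  induction l using pvSegs.induct (tagL := tagL) with
  | case1 => intro _; simp [pvMark, pvSplt, pvSegs]
  | case2 c t hp ih =>
    intro hinf
    rw [pvMark, if_pos hp, List.append_assoc, pv_splt_sep, pv_splt_skip _ _ hnotO,
      ih (fun hi => hinf (hi.trans (List.IsSuffix.isInfix (List.drop_suffix _ _))))]
    rw [pvSegs, if_pos hp]
  | case3 c t hno hp ih =>
    intro hinf
    rw [pvMark, if_neg hno, if_pos hp, List.append_assoc, pv_splt_skip _ _ hnotC, pv_splt_sep,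
      ih (fun hi => hinf (hi.trans (List.IsSuffix.isInfix (List.drop_suffix _ _))))]
    rw [pvSegs, if_neg hno, if_pos hp]
    simp
  | case4 c t hno hnc ih =>
    intro hinf
    rw [pvMark, if_neg hno, if_neg hnc]
    rw [show pvSplt pvM (c :: pvMark tagL t) = (pvSplt pvM (pvMark tagL t)).modifyHead (c :: ·) from by
      rw [pvSplt, dif_neg]
      rintro ⟨-, hpre⟩
      rw [List.isPrefixOf_iff_prefix,
        show pvM = '~' :: (['B', 'R', 'E', 'A', 'K'] ++ ['~']) from rfl,
        List.cons_prefix_cons] at hpre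
      have hb : ['B', 'R', 'E', 'A', 'K'] <+: t :=
        pv_mark_no_q_tilde tagL t _ (by intro x hx; fin_cases hx <;> exact ⟨by decide, by decide⟩) hpre.2
      exact hinf (List.IsPrefix.isInfix (List.cons_prefix_cons.mpr ⟨hpre.1, hb⟩))]
    rw [ih (fun hi => hinf (hi.trans (List.IsSuffix.isInfix (List.suffix_cons c t))))]
    rw [pvSegs, if_neg hno, if_neg hnc]

-- ===== phase 4: fusing the transform fold into the scanner =====
-- (stated in the final proof via pv_scan_fuse below)

-- join with the empty separator concatenates flattened pieces
lemma pv_join_flatten (l : List (List Char)) : PySem.Chars.join [] l = l.flatten := by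
  simp only [PySem.Chars.join, List.intercalate]
  induction l with
  | nil => simp
  | cons a t ih => cases t <;> simp_all [List.intersperse]

-- ''.join(parts + [p]) = ''.join(parts) + p
lemma pv_join_empty_concat (l : List String) (p : String) :
    PySem.Str.join "" (l ++ [p]) = PySem.Str.join "" l ++ p := by
  apply String.toList_injective
  simp [PySem.Str.toList_join, pv_join_flatten]

lemma pv_dropWhile_eq_self {p : Char → Bool} (l : List Char) (h : ∀ c ∈ l, p c = false) :
    List.dropWhile p l = l := by
  rw [List.dropWhile_eq_self_iff]
  intro hl
  simp [h l[0] (List.getElem_mem hl)]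

-- every token produced by str.split() is whitespace-free
lemma pv_go_nonspace : ∀ (s cur : List Char) (acc : List (List Char)),
    (∀ c ∈ cur, PySem.Chars.isspace c = false) →
    (∀ w ∈ acc, ∀ c ∈ w, PySem.Chars.isspace c = false) →
    ∀ w ∈ PySem.Chars.split₀.go s cur acc, ∀ c ∈ w, PySem.Chars.isspace c = false := by
  intro s
  induction s with
  | nil =>
    intro cur acc hcur hacc w hw
    unfold PySem.Chars.split₀.go at hw
    split at hw
    · exact fun c hc => hacc w (List.mem_reverse.mp hw) c hc
    · rcases List.mem_cons.mp (List.mem_reverse.mp hw) with h | h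
      · subst h; exact fun c hc => hcur c (List.mem_reverse.mp hc)
      · exact fun c hc => hacc w h c hc
  | cons a t ih =>
    intro cur acc hcur hacc w hw
    unfold PySem.Chars.split₀.go at hw
    by_cases hsp : PySem.Chars.isspace a = true
    · simp only [hsp, if_true] at hw
      by_cases hce : cur.isEmpty
      · simp only [hce, if_true] at hw
        exact ih [] acc (by simp) hacc w hw
      · simp only [hce] at hw
        refine ih [] (cur.reverse :: acc) (by simp) ?_ w hw
        intro w' hw' c hc
        rcases List.mem_cons.mp hw' with h | h
        · subst h; exact hcur c (List.mem_reverse.mp hc)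
        · exact hacc w' h c hc
    · simp only [hsp] at hw
      refine ih (a :: cur) acc ?_ hacc w hw
      intro c hc
      rcases List.mem_cons.mp hc with h | h
      · subst h; simpa using hsp
      · exact hcur c h

lemma pv_nonspace_strip (w : List Char) (h : ∀ c ∈ w, PySem.Chars.isspace c = false) :
    PySem.Chars.strip w = w := by
  have h1 : PySem.Chars.lstrip w = w := pv_dropWhile_eq_self w h
  have h2 : ∀ c ∈ w.reverse, PySem.Chars.isspace c = false := by
    intro c hc; exact h c (List.mem_reverse.mp hc)
  simp [PySem.Chars.strip, h1, PySem.Chars.rstrip, pv_dropWhile_eq_self w.reverse h2]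

-- stripping the tokens of str.split() changes nothing
lemma pv_strip_split₀ (s : String) :
    (PySem.Str.split₀ s).map PySem.Str.strip = PySem.Str.split₀ s := by
  have key : ∀ w ∈ PySem.Str.split₀ s, PySem.Str.strip w = w := by
    intro w hw
    apply String.toList_injective
    rw [PySem.Str.toList_strip]
    apply pv_nonspace_strip
    apply pv_go_nonspace s.toList [] [] (by simp) (by simp)
    rw [show PySem.Chars.split₀.go s.toList [] [] = PySem.Chars.split₀ s.toList from rfl,
        ← PySem.Str.split₀_map_toList]
    exact List.mem_map_of_mem hw
  conv_rhs => rw [← List.map_id (PySem.Str.split₀ s)]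
  exact List.map_congr_left key

-- part[a:][0:-b] = part[a:-b] for 0 ≤ a, 0 < b
lemma pv_slice_slice (s : String) (a b : Int) (ha : 0 ≤ a) (hb : 0 < b) :
    PySem.Str.slice (PySem.Str.slice s (some a) none) (some 0) (some (-b)) =
    PySem.Str.slice s (some a) (some (-b)) := by
  obtain ⟨a', rfl⟩ : ∃ n : Nat, a = (n : Int) := ⟨a.toNat, by omega⟩
  obtain ⟨b', rfl⟩ : ∃ n : Nat, b = (n : Int) := ⟨b.toNat, by omega⟩
  have hb' : 0 < b' := by exact_mod_cast hb
  unfold PySem.Str.slice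
  rw [String.toList_ofList]
  apply congrArg
  simp only [PySem.Chars.slice_eq_listSlice]
  simp only [PySem.List.slice, PySem.List.clampIdx]
  rw [if_neg (show ¬((a':Int) < 0) by omega), if_neg (show ¬((0:Int) < 0) by omega),
      if_pos (show (-(b':Int)) < 0 by omega), if_pos (show (-(b':Int)) < 0 by omega)]
  set l := s.toList with hl
  set n := l.length with hn
  set A := min ((a':Int)).toNat n with hA
  have hinner : List.take (n - A) (List.drop A l) = List.drop A l := by
    apply List.take_of_length_le; simp [hn]
  rw [hinner]
  rw [List.length_drop]
  apply List.ext_getElem?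
  intro i
  split_ifs <;>
    simp only [List.getElem?_take, List.getElem?_drop] <;>
    split_ifs <;>
    first
      | rfl
      | (exfalso; omega)
      | (congr 1; omega)

-- parts[len(parts)-1] is the last element
lemma pv_pyGet_last (parts : List String) (h : 0 < parts.length) :
    (PySem.List.pyGet? parts ((parts.length : Int) - 1)).getD "" = (parts.getLast?).getD "" := by
  have : ((parts.length : Int) - 1) = ((parts.length - 1 : Nat) : Int) := by omega
  rw [this, PySem.List.pyGet?_natCast, List.getLast?_eq_getElem?]

-- A's per-part transform equals B's helper fed the last part produced so far
set_option maxHeartbeats 1000000 in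
lemma pv_part_eq (tag open_tag close_tag : String) (parts : List String) (part : String)
    (hc : 0 < PySem.Str.len close_tag) :
    (if PySem.Str.startswith part open_tag && PySem.Str.endswith part close_tag then
        let data := PySem.Str.slice part (some (PySem.Str.len open_tag)) none
        let data := PySem.Str.slice data (some 0) (some (-(PySem.Str.len close_tag)))
        let data := PySem.Str.join " " ((PySem.Str.split₀ data).map PySem.Str.strip)
        let part := open_tag ++ data ++ close_tag
        let remove_all : Bool :=
          if tag == "source" && decide (0 < parts.length) then
            PySem.Str.isIn "publication-type=\"journal\"" ((PySem.List.pyGet? parts ((parts.length : Int) - 1)).getD "")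
          else false
        ["italic", "bold", "italic"].foldl (fun (part : String) (style : String) =>
          if remove_all || (PySem.Str.startswith part (open_tag ++ "<" ++ style ++ ">") && PySem.Str.endswith part ("</" ++ style ++ ">" ++ close_tag)) then
            PySem.Str.replace (PySem.Str.replace part ("<" ++ style ++ ">") "") ("</" ++ style ++ ">") ""
          else part) part
      else part) =
    pvFixPart tag open_tag close_tag parts.getLast? part := by
  have ho : 0 ≤ PySem.Str.len open_tag := by simp [PySem.Str.len]
  unfold pvFixPart
  cases hcond : (PySem.Str.startswith part open_tag && PySem.Str.endswith part close_tag) with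
  | false => simp
  | true =>
    simp only [Bool.not_true, if_true, if_false, Bool.false_eq_true]
    rw [pv_strip_split₀, pv_slice_slice _ _ _ ho hc]
    congr 1
    cases parts with
    | nil => simp
    | cons x xs =>
      have hlen : 0 < (x :: xs).length := by simp
      rw [pv_pyGet_last _ hlen]
      obtain ⟨y, hy⟩ : ∃ y, (x :: xs).getLast? = some y := ⟨_, List.getLast?_eq_some_getLast (by simp)⟩
      rw [hy]
      simp

-- the (join, last) fold with a carried previous part equals A's build-list loop
set_option maxHeartbeats 1000000 in
lemma pv_loop_eq (tag open_tag close_tag : String) (ps : List String) (parts : List String)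
    (hc : 0 < PySem.Str.len close_tag) :
    ps.foldl (fun (st : String × Option String) (p : String) =>
        let part := pvFixPart tag open_tag close_tag st.2 p
        (st.1 ++ part, some part)) (PySem.Str.join "" parts, parts.getLast?) =
    (PySem.Str.join "" (ps.foldl (fun (parts : List String) (part : String) =>
        let part :=
          if PySem.Str.startswith part open_tag && PySem.Str.endswith part close_tag then
            let data := PySem.Str.slice part (some (PySem.Str.len open_tag)) none
            let data := PySem.Str.slice data (some 0) (some (-(PySem.Str.len close_tag)))
            let data := PySem.Str.join " " ((PySem.Str.split₀ data).map PySem.Str.strip)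
            let part := open_tag ++ data ++ close_tag
            let remove_all : Bool :=
              if tag == "source" && decide (0 < parts.length) then
                PySem.Str.isIn "publication-type=\"journal\"" ((PySem.List.pyGet? parts ((parts.length : Int) - 1)).getD "")
              else false
            ["italic", "bold", "italic"].foldl (fun (part : String) (style : String) =>
              if remove_all || (PySem.Str.startswith part (open_tag ++ "<" ++ style ++ ">") && PySem.Str.endswith part ("</" ++ style ++ ">" ++ close_tag)) then
                PySem.Str.replace (PySem.Str.replace part ("<" ++ style ++ ">") "") ("</" ++ style ++ ">") ""
              else part) part
          else part
        parts ++ [part]) parts),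
     (ps.foldl (fun (parts : List String) (part : String) =>
        let part :=
          if PySem.Str.startswith part open_tag && PySem.Str.endswith part close_tag then
            let data := PySem.Str.slice part (some (PySem.Str.len open_tag)) none
            let data := PySem.Str.slice data (some 0) (some (-(PySem.Str.len close_tag)))
            let data := PySem.Str.join " " ((PySem.Str.split₀ data).map PySem.Str.strip)
            let part := open_tag ++ data ++ close_tag
            let remove_all : Bool :=
              if tag == "source" && decide (0 < parts.length) then
                PySem.Str.isIn "publication-type=\"journal\"" ((PySem.List.pyGet? parts ((parts.length : Int) - 1)).getD "")
              else false
            ["italic", "bold", "italic"].foldl (fun (part : String) (style : String) =>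
              if remove_all || (PySem.Str.startswith part (open_tag ++ "<" ++ style ++ ">") && PySem.Str.endswith part ("</" ++ style ++ ">" ++ close_tag)) then
                PySem.Str.replace (PySem.Str.replace part ("<" ++ style ++ ">") "") ("</" ++ style ++ ">") ""
              else part) part
          else part
        parts ++ [part]) parts).getLast?) := by
  induction ps generalizing parts with
  | nil => rfl
  | cons p ps ih =>
    simp only [List.foldl_cons]
    rw [show (let part := pvFixPart tag open_tag close_tag (PySem.Str.join "" parts, parts.getLast?).2 p
              ((PySem.Str.join "" parts, parts.getLast?).1 ++ part, some part)) =
        (PySem.Str.join "" (parts ++ [pvFixPart tag open_tag close_tag parts.getLast? p]),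
         (parts ++ [pvFixPart tag open_tag close_tag parts.getLast? p]).getLast?) from by
      simp [pv_join_empty_concat]]
    rw [← pv_part_eq tag open_tag close_tag parts p hc]
    exact ih _

lemma pv_ofList_toList (s : String) : String.ofList s.toList = s := by
  apply String.toList_injective
  simp

lemma pv_ofList_toList_append (s : String) (b : List Char) :
    String.ofList (s.toList ++ b) = s ++ String.ofList b := by
  apply String.toList_injective
  simp

-- the fused scanner equals the (join, last) fold over the direct segmentation
lemma pv_scan_fuse (tag : String) :
    ∀ fuel (rest : List Char), rest.length ≤ fuel → ∀ (cur : String) (prev : Option String) (res : String),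
      pvScanGo tag ("<" ++ tag ++ ">") ("</" ++ tag ++ ">") fuel rest cur prev res =
      ((((pvSegs tag.toList rest).modifyHead (cur.toList ++ ·)).map String.ofList).foldl
        (fun (st : String × Option String) (p : String) =>
          let part := pvFixPart tag ("<" ++ tag ++ ">") ("</" ++ tag ++ ">") st.2 p
          (st.1 ++ part, some part)) (res, prev)).1 := by
  have hot : ("<" ++ tag ++ ">").toList = pvOt tag.toList := by simp [pvOt]
  have hct : ("</" ++ tag ++ ">").toList = pvCt tag.toList := by simp [pvCt]
  have hlo : ("<" ++ tag ++ ">").toList.length = tag.toList.length + 2 := by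
    rw [hot]; simp [pvOt]
  have hlc : ("</" ++ tag ++ ">").toList.length = tag.toList.length + 3 := by
    rw [hct]; simp [pvCt]
  intro fuel
  induction fuel with
  | zero =>
    intro rest h cur prev res
    have hl : rest = [] := by cases rest with | nil => rfl | cons c t => simp at h
    subst hl
    rw [show pvScanGo tag ("<" ++ tag ++ ">") ("</" ++ tag ++ ">") 0 [] cur prev res =
        res ++ pvFixPart tag ("<" ++ tag ++ ">") ("</" ++ tag ++ ">") prev cur from rfl]
    rw [pvSegs]
    simp [pv_ofList_toList]
  | succ fuel ihf =>
    intro rest h cur prev res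
    cases rest with
    | nil =>
      rw [show pvScanGo tag ("<" ++ tag ++ ">") ("</" ++ tag ++ ">") (fuel + 1) [] cur prev res =
          res ++ pvFixPart tag ("<" ++ tag ++ ">") ("</" ++ tag ++ ">") prev cur from rfl]
      rw [pvSegs]
      simp [pv_ofList_toList]
    | cons c t =>
      simp only [List.length_cons] at h
      by_cases hpo : ("<" ++ tag ++ ">").toList.isPrefixOf (c :: t)
      · rw [show pvScanGo tag ("<" ++ tag ++ ">") ("</" ++ tag ++ ">") (fuel + 1) (c :: t) cur prev res =
            pvScanGo tag ("<" ++ tag ++ ">") ("</" ++ tag ++ ">") fuel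
              ((c :: t).drop ("<" ++ tag ++ ">").toList.length)
              ("<" ++ tag ++ ">")
              (some (pvFixPart tag ("<" ++ tag ++ ">") ("</" ++ tag ++ ">") prev cur))
              (res ++ pvFixPart tag ("<" ++ tag ++ ">") ("</" ++ tag ++ ">") prev cur) from by
          rw [pvScanGo, if_pos hpo]]
        rw [ihf _ (by simp only [List.length_drop, List.length_cons]; rw [hlo] at *; omega)]
        conv_rhs => rw [pvSegs, if_pos (hot ▸ hpo)]
        rw [hot]
        simp only [List.modifyHead_cons, List.map_cons, List.foldl_cons, List.append_nil,
          pv_ofList_toList]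
      · by_cases hpc : ("</" ++ tag ++ ">").toList.isPrefixOf (c :: t)
        · rw [show pvScanGo tag ("<" ++ tag ++ ">") ("</" ++ tag ++ ">") (fuel + 1) (c :: t) cur prev res =
              pvScanGo tag ("<" ++ tag ++ ">") ("</" ++ tag ++ ">") fuel
                ((c :: t).drop ("</" ++ tag ++ ">").toList.length)
                ""
                (some (pvFixPart tag ("<" ++ tag ++ ">") ("</" ++ tag ++ ">") prev (cur ++ ("</" ++ tag ++ ">"))))
                (res ++ pvFixPart tag ("<" ++ tag ++ ">") ("</" ++ tag ++ ">") prev (cur ++ ("</" ++ tag ++ ">"))) from by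
            rw [pvScanGo, if_neg hpo, if_pos hpc]]
          rw [ihf _ (by simp only [List.length_drop, List.length_cons]; rw [hlc] at *; omega)]
          conv_rhs => rw [pvSegs, if_neg (by rw [← hot]; exact hpo), if_pos (hct ▸ hpc)]
          rw [hct]
          rw [show ("" : String).toList = ([] : List Char) from rfl, pv_modifyHead_nil]
          simp only [List.modifyHead_cons, List.map_cons, List.foldl_cons]
          rw [show String.ofList (cur.toList ++ pvCt tag.toList) = cur ++ ("</" ++ tag ++ ">") from by
            rw [pv_ofList_toList_append]
            congr 1
            rw [← hct, pv_ofList_toList]]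
        · rw [show pvScanGo tag ("<" ++ tag ++ ">") ("</" ++ tag ++ ">") (fuel + 1) (c :: t) cur prev res =
              pvScanGo tag ("<" ++ tag ++ ">") ("</" ++ tag ++ ">") fuel t (cur.push c) prev res from by
            rw [pvScanGo, if_neg hpo, if_neg hpc]]
          rw [ihf _ (by omega)]
          conv_rhs => rw [pvSegs, if_neg (by rw [← hot]; exact hpo), if_neg (by rw [← hct]; exact hpc)]
          rw [pv_modifyHead_comp]
          rw [show (fun x : List Char => cur.toList ++ (c :: x)) =
              (fun x : List Char => (cur.push c).toList ++ x) from by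
            funext x; simp]

-- ===== VERDICT (by name: the statement is the Claim_ definition above) =====
lemma pv_tilde_parts (tagL : List Char) (h2 : '~' ∉ tagL) :
    '~' ∉ tagL ++ ['>'] := by
  intro hm
  rcases List.mem_append.mp hm with h | h
  · exact h2 h
  · simp only [List.mem_singleton] at h; exact absurd h (by decide)

set_option maxHeartbeats 2000000 in
theorem remove_styles_off_tagged_content_spec : Claim_equal_remove_styles_off_tagged_content := by
  intro tag content _ hpre
  obtain ⟨h1, h2, h3⟩ := hpre
  unfold Spec_remove_styles_off_tagged_content
  unfold remove_styles_off_tagged_content remove_styles_off_tagged_content_alt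
  dsimp only
  have hc : 0 < PySem.Str.len ("</" ++ tag ++ ">") := by simp [PySem.Str.len]; omega
  -- names for the pieces
  set c1 : String := PySem.Str.replace
      (PySem.Str.replace content ("<" ++ tag ++ ">" ++ " ") (" " ++ ("<" ++ tag ++ ">")))
      (" " ++ ("</" ++ tag ++ ">")) ("</" ++ tag ++ ">" ++ " ") with hc1
  -- the whitespace pass cannot create '~BREAK'
  have hMB : ("~BREAK".toList : List Char) = pvMB := by decide
  rw [hMB] at h3
  have noInf1 : ¬ pvMB <:+: c1.toList := by
    intro hinf
    rw [hc1] at hinf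
    simp only [PySem.Str.toList_replace] at hinf
    rw [pv_replace_eq _ _ _ (by simp), pv_replace_eq _ _ _ (by simp)] at hinf
    rw [show (("</" ++ tag ++ ">") ++ " ").toList = '<' :: (('/' :: (tag.toList ++ ['>'])) ++ [' ']) from by simp] at hinf
    have step1 := pv_infix_of_infix_repl _ '<' _ (by simp) (by decide) (by
      intro hm
      rcases List.mem_cons.mp hm with h | h
      · exact absurd h (by decide)
      · rcases List.mem_append.mp h with h | h
        · rcases List.mem_cons.mp h with h | h
          · exact absurd h (by decide)
          · exact pv_tilde_parts tag.toList h2 h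
        · simp only [List.mem_singleton] at h; exact absurd h (by decide)) _ hinf
    rw [show ((" " : String) ++ ("<" ++ tag ++ ">")).toList = ' ' :: ('<' :: (tag.toList ++ ['>'])) from by simp] at step1
    have step2 := pv_infix_of_infix_repl _ ' ' _ (by simp) (by decide) (by
      intro hm
      rcases List.mem_cons.mp hm with h | h
      · exact absurd h (by decide)
      · rcases List.mem_cons.mp h with h | h
        · exact absurd h (by decide)
        · exact pv_tilde_parts tag.toList h2 h) _ step1
    exact h3 step2
  -- A's parts list is the direct segmentation
  have hparts : ((PySem.Str.split? (PySem.Str.replace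
      (PySem.Str.replace c1 ("<" ++ tag ++ ">") ("~BREAK~" ++ ("<" ++ tag ++ ">")))
      ("</" ++ tag ++ ">") ("</" ++ tag ++ ">" ++ "~BREAK~")) "~BREAK~").getD [])
      = (pvSegs tag.toList c1.toList).map String.ofList := by
    unfold PySem.Str.split? PySem.Chars.split?
    rw [show ("~BREAK~" : String).toList = pvM from by decide]
    rw [if_neg (by decide)]
    simp only [Option.map_some, Option.getD_some]
    congr 1
    rw [pv_splitOn_eq _ _ (by decide)]
    simp only [PySem.Str.toList_replace]
    rw [pv_replace_eq _ _ _ (by simp), pv_replace_eq _ _ _ (by simp)]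
    rw [show (("~BREAK~" : String) ++ ("<" ++ tag ++ ">")).toList = pvM ++ pvOt tag.toList from by
      rw [String.toList_append, show ("~BREAK~" : String).toList = pvM from by decide,
        show ("<" ++ tag ++ ">").toList = pvOt tag.toList from by simp [pvOt]]]
    rw [show (("</" ++ tag ++ ">") ++ ("~BREAK~" : String)).toList = pvCt tag.toList ++ pvM from by
      rw [String.toList_append, show ("~BREAK~" : String).toList = pvM from by decide,
        show ("</" ++ tag ++ ">").toList = pvCt tag.toList from by simp [pvCt]]]
    rw [show ("<" ++ tag ++ ">").toList = pvOt tag.toList from by simp [pvOt]]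
    rw [show ("</" ++ tag ++ ">").toList = pvCt tag.toList from by simp [pvCt]]
    rw [pv_replace2_eq_mark tag.toList h1 h2, pv_split_mark tag.toList h1 h2 _ noInf1]
  rw [hparts]
  rw [pv_scan_fuse tag _ _ le_rfl]
  rw [show ("" : String).toList = [] from rfl, pv_modifyHead_nil]
  rw [show (("" : String), (none : Option String)) =
      (PySem.Str.join "" ([] : List String), ([] : List String).getLast?) from rfl]
  rw [pv_loop_eq tag ("<" ++ tag ++ ">") ("</" ++ tag ++ ">") _ [] hc]
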